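-- pv_equiv track=rewrite | github.com/fast-sim/step2point | src/step2point/geometry/dd4hep/bitfield.py | decode_dd4hep_cell_id
-- ===== SOURCE A (Python) =====
-- from dataclasses import dataclass
--
-- @dataclass(frozen=True, slots=True)
-- class CellIDField:
--     name: str
--     offset: int
--     width: int
--     signed: bool
--
-- def parse_dd4hep_id_encoding(id_encoding: str) -> tuple[CellIDField, ...]:
--     fields: list[CellIDField] = []
--     next_offset = 0
--     for raw_field in id_encoding.split(","):
--         token = raw_field.strip()
--         if not token:
--             continue
--         parts = token.split(":")
--         if len(parts) == 2:
--             name, width_spec = parts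
--             offset = next_offset
--         elif len(parts) == 3:
--             name, offset_spec, width_spec = parts
--             offset = int(offset_spec)
--         else:
--             raise ValueError(f"Unsupported DD4hep id field specification: {token!r}")
--         signed = int(width_spec) < 0
--         width = abs(int(width_spec))
--         fields.append(CellIDField(name=name, offset=offset, width=width, signed=signed))
--         next_offset = offset + width
--     return tuple(fields)
--
-- def decode_dd4hep_cell_id(cell_id: int, id_encoding: str) -> dict[str, int]:
--     decoded: dict[str, int] = {}
--     for field in parse_dd4hep_id_encoding(id_encoding):
--         raw_value = (int(cell_id) >> field.offset) & ((1 << field.width) - 1)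
--         if field.signed and raw_value >= (1 << (field.width - 1)):
--             raw_value -= 1 << field.width
--         decoded[field.name] = int(raw_value)
--     return decoded
-- ===== SOURCE B (Python) =====
-- def decode_dd4hep_cell_id(cell_id: int, id_encoding: str) -> dict[str, int]:
--     # Single fused pass: parse each field token and decode it immediately
--     # (no intermediate field objects); signed fields use a branch-free
--     # centered-modulus formula instead of a two's-complement correction.
--     decoded: dict[str, int] = {}
--     next_offset = 0
--     x = int(cell_id)
--     for raw_field in id_encoding.split(","):
--         token = raw_field.strip()
--         if not token:
--             continue
--         parts = token.split(":")
--         if len(parts) == 2: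
--             name, width_spec = parts
--             offset = next_offset
--         elif len(parts) == 3:
--             name, offset_spec, width_spec = parts
--             offset = int(offset_spec)
--         else:
--             raise ValueError(f"Unsupported DD4hep id field specification: {token!r}")
--         w = int(width_spec)
--         if w < 0:
--             w = -w
--             half = 1 << (w - 1)
--             decoded[name] = ((x >> offset) + half) % (1 << w) - half
--         else:
--             decoded[name] = (x >> offset) & ((1 << w) - 1)
--         next_offset = offset + w
--     return decoded
-- ===== Notes on version B (the rewrite author's own statement) =====
-- stated objective: simpler
-- what changed: B fuses A's two-stage pipeline (parse the encoding into a tuple of CellIDField objects, then iterate over them to decode) into a single pass over the comma tokens that parses and decodes each field in place, and replaces the signed two's-complement branch by a branch-free centered-modulus formula.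
import Mathlib
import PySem

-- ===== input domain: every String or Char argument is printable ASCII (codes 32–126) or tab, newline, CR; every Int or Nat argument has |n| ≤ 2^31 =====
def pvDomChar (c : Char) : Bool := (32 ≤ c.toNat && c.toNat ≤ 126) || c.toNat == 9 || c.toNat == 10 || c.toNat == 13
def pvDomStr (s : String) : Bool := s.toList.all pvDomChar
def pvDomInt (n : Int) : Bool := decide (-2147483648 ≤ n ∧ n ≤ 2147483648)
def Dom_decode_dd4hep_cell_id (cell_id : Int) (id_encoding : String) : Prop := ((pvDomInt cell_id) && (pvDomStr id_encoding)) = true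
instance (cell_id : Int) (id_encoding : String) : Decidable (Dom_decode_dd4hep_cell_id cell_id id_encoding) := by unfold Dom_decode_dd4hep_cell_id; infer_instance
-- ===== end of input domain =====

-- B fuses A's parse-then-decode pipeline into one pass over the tokens (no field objects)
-- and replaces the two's-complement branch by a centered-modulus formula; objective: simpler.

-- ===== PORT A =====
-- A raising ValueError (bad arity / unparsable spec) is modelled by `none`;
-- the outer function returns [] there (outside Pre_, where nothing is claimed).
def pvFieldsLoop (toks : List String) (next_offset : Int)
    (acc : List (String × Int × Int × Bool)) : Option (List (String × Int × Int × Bool)) :=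
  match toks with
  | [] => some acc
  | raw :: rest =>
    let token := PySem.Str.strip raw
    if token = "" then pvFieldsLoop rest next_offset acc else
    match (PySem.Str.split? token ":").getD [] with
    | [name, width_spec] =>
      match PySem.Int.ofStr? width_spec with
      | none => none
      | some wv =>
        let signed := decide (wv < 0)
        let width := |wv|
        pvFieldsLoop rest (next_offset + width) (acc ++ [(name, next_offset, width, signed)])
    | [name, offset_spec, width_spec] =>
      match PySem.Int.ofStr? offset_spec with
      | none => none
      | some offset =>
        match PySem.Int.ofStr? width_spec with
        | none => none
        | some wv =>
          let signed := decide (wv < 0)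
          let width := |wv|
          pvFieldsLoop rest (offset + width) (acc ++ [(name, offset, width, signed)])
    | _ => none

def pvDecodeField (cell_id : Int) (d : PySem.Dict String Int)
    (f : String × Int × Int × Bool) : PySem.Dict String Int :=
  let raw := PySem.Int.band (cell_id >>> f.2.1.toNat) (((1:Int) <<< f.2.2.1.toNat) - 1)
  let raw' := if f.2.2.2 && decide (((1:Int) <<< (f.2.2.1 - 1).toNat) ≤ raw)
              then raw - ((1:Int) <<< f.2.2.1.toNat) else raw
  d.insert f.1 raw'

def decode_dd4hep_cell_id (cell_id : Int) (id_encoding : String) : List (String × Int) :=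
  match pvFieldsLoop ((PySem.Str.split? id_encoding ",").getD []) 0 [] with
  | none => []
  | some fields => (fields.foldl (pvDecodeField cell_id) PySem.Dict.empty).items

-- ===== PORT B =====
def pvDecodeLoop (cell_id : Int) (toks : List String) (next_offset : Int)
    (d : PySem.Dict String Int) : Option (PySem.Dict String Int) :=
  match toks with
  | [] => some d
  | raw :: rest =>
    let token := PySem.Str.strip raw
    if token = "" then pvDecodeLoop cell_id rest next_offset d else
    match (PySem.Str.split? token ":").getD [] with
    | [name, width_spec] =>
      match PySem.Int.ofStr? width_spec with
      | none => none
      | some w0 =>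
        if w0 < 0 then
          let w := -w0
          let half := (1:Int) <<< (w - 1).toNat
          pvDecodeLoop cell_id rest (next_offset + w)
            (d.insert name (PySem.Int.mod ((cell_id >>> next_offset.toNat) + half) ((1:Int) <<< w.toNat) - half))
        else
          pvDecodeLoop cell_id rest (next_offset + w0)
            (d.insert name (PySem.Int.band (cell_id >>> next_offset.toNat) (((1:Int) <<< w0.toNat) - 1)))
    | [name, offset_spec, width_spec] =>
      match PySem.Int.ofStr? offset_spec with
      | none => none
      | some offset =>
        match PySem.Int.ofStr? width_spec with
        | none => none
        | some w0 =>
          if w0 < 0 then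
            let w := -w0
            let half := (1:Int) <<< (w - 1).toNat
            pvDecodeLoop cell_id rest (offset + w)
              (d.insert name (PySem.Int.mod ((cell_id >>> offset.toNat) + half) ((1:Int) <<< w.toNat) - half))
          else
            pvDecodeLoop cell_id rest (offset + w0)
              (d.insert name (PySem.Int.band (cell_id >>> offset.toNat) (((1:Int) <<< w0.toNat) - 1)))
    | _ => none

def decode_dd4hep_cell_id_alt (cell_id : Int) (id_encoding : String) : List (String × Int) :=
  match pvDecodeLoop cell_id ((PySem.Str.split? id_encoding ",").getD []) 0 PySem.Dict.empty with
  | none => []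
  | some d => d.items

-- ===== PRECONDITION & SPEC =====
-- Pre_ excludes exactly the encodings on which Python A raises: a nonempty stripped token
-- whose ':'-split has arity ≠ 2/3, an unparsable offset/width spec (ValueError from int()),
-- or an explicit negative offset (ValueError from a negative shift count).
def pvOkTok (raw : String) : Bool :=
  let token := PySem.Str.strip raw
  if token = "" then true else
  match (PySem.Str.split? token ":").getD [] with
  | [_, w] => (PySem.Int.ofStr? w).isSome
  | [_, o, w] => (PySem.Int.ofStr? w).isSome &&
      (match PySem.Int.ofStr? o with | some v => decide (0 ≤ v) | none => false)
  | _ => false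

def Pre_decode_dd4hep_cell_id (cell_id : Int) (id_encoding : String) : Prop :=
  ((PySem.Str.split? id_encoding ",").getD []).all pvOkTok = true
-- e.g. Pre_ holds for "system:8,barrel:3,layer:-4" and "u:4:8, v:-6, w:12:-10" and "x:0:5,y:5:5"
-- but not for "a:b" (unparsable width), "a:1:2:3" (bad arity) or "a:-1:2" (negative shift).
instance (cell_id : Int) (id_encoding : String) : Decidable (Pre_decode_dd4hep_cell_id cell_id id_encoding) := by
  unfold Pre_decode_dd4hep_cell_id; infer_instance

def pvWitness_decode_dd4hep_cell_id : Int × String := (3026, "system:8, layer:4:-4, x:-8")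

def Spec_decode_dd4hep_cell_id (cell_id : Int) (id_encoding : String) (out : List (String × Int)) : Prop := out = decode_dd4hep_cell_id_alt cell_id id_encoding
instance (cell_id : Int) (id_encoding : String) (out : List (String × Int)) : Decidable (Spec_decode_dd4hep_cell_id cell_id id_encoding out) := by unfold Spec_decode_dd4hep_cell_id; infer_instance

-- ===== CLAIM (what is proved, stated in full; the proofs are below) =====
def Claim_equal_decode_dd4hep_cell_id : Prop := ∀ (cell_id : Int) (id_encoding : String), Dom_decode_dd4hep_cell_id cell_id id_encoding → Pre_decode_dd4hep_cell_id cell_id id_encoding → Spec_decode_dd4hep_cell_id cell_id id_encoding (decode_dd4hep_cell_id cell_id id_encoding)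

-- ===== LEMMAS AND PROOFS =====


theorem pv_one_shl (w : Nat) : ((1:Int) <<< w) = 2 ^ w := by
  simp [Int.shiftLeft_eq]

theorem pv_band_mask (a : Int) (w : Nat) :
    PySem.Int.band a (((1:Int) <<< w) - 1) = a % ((2:Int) ^ w) := by
  rw [pv_one_shl]
  unfold PySem.Int.band
  have hpow : ((2:Int) ^ w) = ((2 ^ w : Nat) : Int) := by push_cast; ring
  have hposn : 0 < 2 ^ w := by positivity
  have hm : (0:Int) ≤ (2:Int) ^ w - 1 := by rw [hpow]; omega
  have h1 : ((2:Int) ^ w - 1).toNat = 2 ^ w - 1 := by omega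
  have hc : ∀ k : Nat, ((k : Int)) % ((2:Int) ^ w) = ((k % 2 ^ w : Nat) : Int) := by
    intro k; rw [hpow]; push_cast; rfl
  by_cases ha : (0 ≤ a)
  · simp only [ha, hm, if_true]
    rw [h1, Nat.and_two_pow_sub_one_eq_mod]
    have h2 : a = ((a.toNat : Nat) : Int) := by omega
    rw [h2, hc]; simp
  · simp only [ha, hm, if_true, if_false]
    set m := (-a - 1).toNat with hmdef
    have ham : a = -(m : Int) - 1 := by omega
    have hlt : m % 2 ^ w < 2 ^ w := Nat.mod_lt _ hposn
    rw [h1, Nat.and_comm, Nat.and_two_pow_sub_one_eq_mod]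
    have hmod : a % ((2:Int) ^ w) = ((2:Int) ^ w - 1 - ((m % 2 ^ w : Nat) : Int)) := by
      rw [ham]
      calc (-(m:Int) - 1) % (2:Int) ^ w
          = ((2:Int) ^ w - 1 - (m:Int)) % (2:Int) ^ w := by
            rw [show (2:Int) ^ w - 1 - (m:Int) = (-(m:Int) - 1) + (2:Int) ^ w * 1 by ring,
              Int.add_mul_emod_self_left]
        _ = ((2:Int) ^ w - 1 - (m:Int) % (2:Int) ^ w) % (2:Int) ^ w := by
            conv_lhs => rw [Int.sub_emod ((2:Int)^w - 1)]
            conv_rhs => rw [Int.sub_emod ((2:Int)^w - 1), Int.emod_emod_of_dvd _ (dvd_refl _)]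
        _ = (2:Int) ^ w - 1 - (m:Int) % (2:Int) ^ w := by
            apply Int.emod_eq_of_lt <;> rw [hc] <;> rw [hpow] <;> omega
        _ = (2:Int) ^ w - 1 - ((m % 2 ^ w : Nat) : Int) := by rw [hc]
    rw [hmod, hpow]
    omega

theorem pv_mod_pos (a b : Int) (hb : 0 ≤ b) : PySem.Int.mod a b = a % b := by
  unfold PySem.Int.mod
  rw [Int.fmod_eq_emod]
  simp [hb]

theorem pv_val_signed (x : Int) (k : Nat) :
    PySem.Int.mod (x + ((1:Int) <<< k)) ((1:Int) <<< (k+1)) - ((1:Int) <<< k)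
    = (if decide (((1:Int) <<< k) ≤ PySem.Int.band x (((1:Int) <<< (k+1)) - 1)) = true
       then PySem.Int.band x (((1:Int) <<< (k+1)) - 1) - ((1:Int) <<< (k+1))
       else PySem.Int.band x (((1:Int) <<< (k+1)) - 1)) := by
  simp only [decide_eq_true_eq]
  rw [pv_band_mask, pv_one_shl, pv_one_shl, pv_mod_pos _ _ (by positivity)]
  set h := (2:Int) ^ k with hh
  have hn : (2:Int) ^ (k+1) = 2 * h := by rw [hh]; ring
  have hpos : 0 < h := by positivity
  have hr := Int.emod_nonneg x (b := 2 * h) (by omega)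
  have hr2 := Int.emod_lt_of_pos x (b := 2 * h) (by omega)
  have hstep : (x + h) % (2 * h) = (x % (2 * h) + h) % (2 * h) := by
    conv_rhs => rw [Int.add_emod, Int.emod_emod_of_dvd _ (dvd_refl _), ← Int.add_emod]
  rw [hn, hstep]
  set r := x % (2 * h) with hrdef
  by_cases hcase : h ≤ r
  · rw [if_pos hcase]
    have : (r + h) % (2 * h) = (r - h) % (2 * h) := by
      rw [show r + h = (r - h) + (2*h) * 1 by ring, Int.add_mul_emod_self_left]
    rw [this, Int.emod_eq_of_lt (by omega) (by omega)]
    ring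
  · rw [if_neg hcase, Int.emod_eq_of_lt (by omega) (by omega)]
    ring


set_option maxHeartbeats 1000000 in
theorem pv_fused (cell_id : Int) (toks : List String) :
    ∀ (noff : Int) (acc : List (String × Int × Int × Bool)) (d : PySem.Dict String Int),
    pvDecodeLoop cell_id toks noff (acc.foldl (pvDecodeField cell_id) d)
    = Option.map (fun fs => fs.foldl (pvDecodeField cell_id) d) (pvFieldsLoop toks noff acc) := by
  induction toks with
  | nil => intro noff acc d; simp [pvDecodeLoop, pvFieldsLoop]
  | cons raw rest ih =>
    intro noff acc d
    rw [pvDecodeLoop, pvFieldsLoop]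
    by_cases htok : PySem.Str.strip raw = ""
    · simp only [htok, if_true]
      exact ih noff acc d
    · simp only [htok, if_false]
      rcases hps : (PySem.Str.split? (PySem.Str.strip raw) ":").getD [] with _ | ⟨name, _ | ⟨s2, _ | ⟨s3, _ | ⟨s4, tl⟩⟩⟩⟩
      · rfl
      · rfl
      · -- two parts: name : width_spec
        rcases hw : PySem.Int.ofStr? s2 with _ | wv
        · simp only [hw]; rfl
        · simp only [hw]
          by_cases hneg : wv < 0
          · rw [if_pos hneg]
            have habs : |wv| = -wv := abs_of_neg hneg
            have hk : (-wv).toNat = (-wv - 1).toNat + 1 := by omega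
            have := ih (noff + -wv) (acc ++ [(name, noff, -wv, decide (wv < 0))]) d
            rw [List.foldl_append] at this
            rw [habs]
            rw [← this]
            congr 1
            unfold pvDecodeField
            simp only [List.foldl_cons, List.foldl_nil, decide_eq_true hneg, Bool.true_and]
            rw [hk, pv_val_signed (cell_id >>> noff.toNat) ((-wv - 1).toNat)]
          · rw [if_neg hneg]
            have habs : |wv| = wv := abs_of_nonneg (by omega)
            have := ih (noff + wv) (acc ++ [(name, noff, wv, decide (wv < 0))]) d
            rw [List.foldl_append] at this
            rw [habs, ← this]
            congr 1
            unfold pvDecodeField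
            simp [decide_eq_false hneg]
      · -- three parts
        rcases ho : PySem.Int.ofStr? s2 with _ | off
        · simp only [ho]; rfl
        · rcases hw : PySem.Int.ofStr? s3 with _ | wv
          · simp only [ho, hw]; rfl
          · simp only [ho, hw]
            by_cases hneg : wv < 0
            · rw [if_pos hneg]
              have habs : |wv| = -wv := abs_of_neg hneg
              have hk : (-wv).toNat = (-wv - 1).toNat + 1 := by omega
              have := ih (off + -wv) (acc ++ [(name, off, -wv, decide (wv < 0))]) d
              rw [List.foldl_append] at this
              rw [habs, ← this]
              congr 1
              unfold pvDecodeField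
              simp only [List.foldl_cons, List.foldl_nil, decide_eq_true hneg, Bool.true_and]
              rw [hk, pv_val_signed (cell_id >>> off.toNat) ((-wv - 1).toNat)]
            · rw [if_neg hneg]
              have habs : |wv| = wv := abs_of_nonneg (by omega)
              have := ih (off + wv) (acc ++ [(name, off, wv, decide (wv < 0))]) d
              rw [List.foldl_append] at this
              rw [habs, ← this]
              congr 1
              unfold pvDecodeField
              simp [decide_eq_false hneg]
      · rfl

-- ===== VERDICT (by name: the statement is the Claim_ definition above) =====
set_option maxHeartbeats 1000000 in
theorem decode_dd4hep_cell_id_spec : Claim_equal_decode_dd4hep_cell_id := by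
  intro cell_id id_encoding _ _
  unfold Spec_decode_dd4hep_cell_id decode_dd4hep_cell_id decode_dd4hep_cell_id_alt
  have h := pv_fused cell_id ((PySem.Str.split? id_encoding ",").getD []) 0 [] PySem.Dict.empty
  simp only [List.foldl_nil] at h
  rw [h]
  cases pvFieldsLoop ((PySem.Str.split? id_encoding ",").getD []) 0 [] <;> rfl
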